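-- pv_equiv track=rewrite | github.com/klenwell/code-challenges | python/advent-of-code/2015/day-08.py | encoded_line_len
-- ===== SOURCE A (Python) =====
-- def encoded_line_len(line):
--     bs = '\\'
--     dq = '"'
--     chrs = [dq, bs, bs]
--
--     for n, chr in enumerate(list(line[1:-1])):
--         if chr in (bs, dq):
--             chrs += [bs, chr]
--         else:
--             chrs.append(chr)
--
--     chrs += [bs, dq, dq]
--     return len(chrs)
-- ===== SOURCE B (Python) =====
-- def encoded_line_len(line):
--     inner = line[1:-1]
--     return 6 + len(inner) + inner.count('"') + inner.count('\\')
-- ===== Notes on version B (the rewrite author's own statement) =====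
-- stated objective: simpler
-- what changed: Replaces A's per-character loop that builds an explicit escaped character list with a closed-form arithmetic formula over inner = line[1:-1]: 6 + len(inner) + inner.count(chr(34)) + 2-backslash count.
import Mathlib
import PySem

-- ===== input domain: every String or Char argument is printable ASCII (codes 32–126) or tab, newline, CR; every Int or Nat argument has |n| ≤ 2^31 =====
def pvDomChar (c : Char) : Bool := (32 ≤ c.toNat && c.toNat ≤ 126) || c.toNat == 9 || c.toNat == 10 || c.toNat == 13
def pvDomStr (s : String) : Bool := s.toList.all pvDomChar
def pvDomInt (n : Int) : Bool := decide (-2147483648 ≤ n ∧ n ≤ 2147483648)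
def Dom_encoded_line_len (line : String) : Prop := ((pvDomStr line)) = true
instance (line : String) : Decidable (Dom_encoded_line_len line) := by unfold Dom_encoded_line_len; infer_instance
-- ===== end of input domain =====

-- B replaces A's character-list-building loop with a closed-form count formula (objective: simpler).

-- ===== PORT A =====
def encoded_line_len (line : String) : Int :=
  let bs : Char := '\\'
  let dq : Char := '"'
  let chrs : List Char := [dq, bs, bs]
  let chrs := (PySem.List.enumerate (PySem.List.slice line.toList (some 1) (some (-1)))).foldl
    (fun chrs p => if p.2 = bs ∨ p.2 = dq then chrs ++ [bs, p.2] else chrs ++ [p.2]) chrs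
  let chrs := chrs ++ [bs, dq, dq]
  (chrs.length : Int)

-- ===== PORT B =====
def encoded_line_len_alt (line : String) : Int :=
  let inner := PySem.Str.slice line (some 1) (some (-1))
  6 + (PySem.Str.len inner) + (PySem.Str.count inner "\"" : Int) + (PySem.Str.count inner "\\" : Int)

-- ===== PRECONDITION & SPEC =====
def Spec_encoded_line_len (line : String) (out : Int) : Prop := out = encoded_line_len_alt line
instance (line : String) (out : Int) : Decidable (Spec_encoded_line_len line out) := by unfold Spec_encoded_line_len; infer_instance

-- ===== CLAIM (what is proved, stated in full; the proofs are below) =====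
def Claim_equal_encoded_line_len : Prop := ∀ (line : String), Dom_encoded_line_len line → Spec_encoded_line_len line (encoded_line_len line)

-- ===== LEMMAS AND PROOFS =====

-- PySem.Chars.count with a single-character needle is List.count.
theorem pv_count_go_singleton (c : Char) (l : List Char) : ∀ (n a : Nat), l.length ≤ n →
    PySem.Chars.count.go [c] n l a = a + l.count c := by
  induction l with
  | nil => intro n a _; cases n <;> simp [PySem.Chars.count.go]
  | cons x t ih =>
    intro n a h
    cases n with
    | zero => simp at h
    | succ m =>
      rw [PySem.Chars.count.go]
      simp only [List.isPrefixOf] at *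
      by_cases hx : c = x
      · subst hx
        simp [ih m (a+1) (by simpa using h)]
        omega
      · simp [ih m a (by simpa using h), Ne.symm hx]
        exact fun h' => absurd h' hx

theorem pv_count_singleton (s : List Char) (c : Char) :
    PySem.Chars.count s [c] = s.count c := by
  simpa using pv_count_go_singleton c s s.length 0 le_rfl

-- Length invariant of A's accumulating loop.
theorem pv_foldl_len (ps : List (Int × Char)) : ∀ (acc : List Char),
    ((ps.foldl
      (fun chrs p => if p.2 = '\\' ∨ p.2 = '"' then chrs ++ ['\\', p.2] else chrs ++ [p.2]) acc).length : Int)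
    = acc.length + ps.length + (ps.map Prod.snd).count '"' + (ps.map Prod.snd).count '\\' := by
  induction ps with
  | nil => intro acc; simp
  | cons p t ih =>
    intro acc
    simp only [List.foldl_cons, List.map_cons, List.length_cons]
    by_cases hp : p.2 = '\\' ∨ p.2 = '"'
    · rw [if_pos hp, ih]
      rcases hp with h | h <;> simp [h] <;> ring
    · rw [if_neg hp]
      push Not at hp
      rw [ih]
      simp [hp.1, hp.2]
      ring

-- ===== VERDICT (by name: the statement is the Claim_ definition above) =====
theorem encoded_line_len_spec : Claim_equal_encoded_line_len := by
  intro line _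
  unfold Spec_encoded_line_len encoded_line_len encoded_line_len_alt
  simp only [PySem.Str.count_eq, PySem.Str.len_eq, PySem.Str.toList_slice]
  rw [show ("\"" : String).toList = ['"'] from rfl, show ("\\" : String).toList = ['\\'] from rfl]
  rw [pv_count_singleton, pv_count_singleton]
  have hcs : PySem.Chars.slice line.toList (some 1) (some (-1))
      = PySem.List.slice line.toList (some 1) (some (-1)) := rfl
  rw [hcs]
  set l := PySem.List.slice line.toList (some 1) (some (-1)) with hl
  simp only [List.length_append]
  push_cast
  rw [pv_foldl_len]
  rw [PySem.List.map_snd_enumerate, PySem.List.length_enumerate]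
  norm_num; ring
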